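-- pv_equiv track=rewrite | github.com/howardh0214/Algorithms-Homework | HW9/count.py | create_even
-- ===== SOURCE A (Python) =====
-- def create_even(n):
--     output = []
--     if n == 2:
--         output = [1, 1]
--     else:
--         for i in range(1, int(n/2)+1):
--             output.append(i)
--         for i in range(int(n/2), 0, -1):
--             output.append(i)
--     return output
-- ===== SOURCE B (Python) =====
-- def create_even(n):
--     h = int(n / 2)
--     return [min(j + 1, 2 * h - j) for j in range(2 * h)]
-- ===== Notes on version B (the rewrite author's own statement) =====
-- stated objective: simpler
-- what changed: Replaces the special n==2 case and the two append loops (ascending then descending) by a single comprehension over one index range emitting min(j+1, 2*h-j).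
import Mathlib
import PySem

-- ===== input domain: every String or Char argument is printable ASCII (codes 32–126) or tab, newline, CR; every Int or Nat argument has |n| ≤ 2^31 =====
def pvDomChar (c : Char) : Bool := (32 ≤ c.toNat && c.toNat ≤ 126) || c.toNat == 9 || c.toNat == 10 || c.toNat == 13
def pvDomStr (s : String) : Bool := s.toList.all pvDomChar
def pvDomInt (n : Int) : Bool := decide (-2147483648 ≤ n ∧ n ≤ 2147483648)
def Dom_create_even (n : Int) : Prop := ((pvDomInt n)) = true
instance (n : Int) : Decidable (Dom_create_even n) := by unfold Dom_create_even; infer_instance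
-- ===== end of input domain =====

-- B replaces A's special n==2 case and its two append loops by one comprehension
-- emitting min(j+1, 2*h-j); objective: simpler.

-- ===== PORT A =====
-- int(n/2): Python float division then truncation toward zero; exact on Dom (|n| ≤ 2^31,
-- division by 2 is exact in binary floating point there) and equals Int.tdiv n 2.
def create_even (n : Int) : List Int :=
  let output : List Int := []
  if n == 2 then
    [1, 1]
  else
    let output := (PySem.List.pyRange 1 (n.tdiv 2 + 1) 1).foldl (fun acc i => acc ++ [i]) output
    let output := (PySem.List.pyRange (n.tdiv 2) 0 (-1)).foldl (fun acc i => acc ++ [i]) output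
    output

-- ===== PORT B =====
def create_even_alt (n : Int) : List Int :=
  let h := n.tdiv 2
  (PySem.List.pyRange 0 (2 * h) 1).map (fun j => min (j + 1) (2 * h - j))

-- ===== PRECONDITION & SPEC =====
def Spec_create_even (n : Int) (out : List Int) : Prop := out = create_even_alt n
instance (n : Int) (out : List Int) : Decidable (Spec_create_even n out) := by unfold Spec_create_even; infer_instance

-- ===== CLAIM (what is proved, stated in full; the proofs are below) =====
def Claim_equal_create_even : Prop := ∀ (n : Int), Dom_create_even n → Spec_create_even n (create_even n)

-- ===== LEMMAS AND PROOFS =====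

theorem foldl_append_singleton (xs : List Int) (l : List Int) :
    xs.foldl (fun acc i => acc ++ [i]) l = l ++ xs := by
  induction xs generalizing l with
  | nil => simp
  | cons x xs ih => simp [List.foldl, ih]

-- the core identity: ascending half ++ descending half = the min-formula comprehension
theorem halves_eq_min (h : Int) :
    PySem.List.pyRange 1 (h + 1) 1 ++ PySem.List.pyRange h 0 (-1)
      = (PySem.List.pyRange 0 (2 * h) 1).map (fun j => min (j + 1) (2 * h - j)) := by
  rw [PySem.List.pyRange_one, PySem.List.pyRange_neg_one, PySem.List.pyRange_one]
  have h1 : (h + 1 - 1).toNat = h.toNat := by omega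
  have h2 : (h - 0).toNat = h.toNat := by omega
  have h3 : (2 * h - 0).toNat = 2 * h.toNat := by omega
  rw [h1, h2, h3]
  apply List.ext_getElem
  · simp [Nat.two_mul]
  · intro k hk1 hk2
    simp only [List.length_append, List.length_map, List.length_range] at hk1
    simp only [List.length_map, List.length_range] at hk2
    by_cases hkm : k < h.toNat
    · rw [List.getElem_append_left (by simpa using hkm)]
      simp only [List.getElem_map, List.getElem_range]
      have hh : 0 ≤ h := by omega
      have : min ((k : Int) + 1) (2 * h - k) = 1 + k := by omega
      omega
    · rw [List.getElem_append_right (by simpa using hkm)]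
      simp only [List.getElem_map, List.getElem_range, List.length_map, List.length_range]
      have hh : 0 ≤ h := by omega
      have hkk : (k : Int) < 2 * h := by
        have : (k : Int) < 2 * h.toNat := by exact_mod_cast hk2
        omega
      have hkge : (h : Int) ≤ k := by
        have : h.toNat ≤ k := by omega
        omega
      have : min ((k : Int) + 1) (2 * h - k) = 2 * h - k := by omega
      have hcast : ((k - h.toNat : Nat) : Int) = (k : Int) - h := by omega
      omega

theorem create_even_eq (n : Int) : create_even n = create_even_alt n := by
  unfold create_even create_even_alt
  by_cases h2 : n = 2
  · subst h2; decide
  · simp only [h2, beq_iff_eq, if_false, foldl_append_singleton, List.nil_append]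
    exact halves_eq_min (n.tdiv 2)

-- ===== VERDICT (by name: the statement is the Claim_ definition above) =====
theorem create_even_spec : Claim_equal_create_even := by
  intro n _
  unfold Spec_create_even
  exact create_even_eq n
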